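-- pv_equiv track=rewrite | github.com/stabbotco1/mypylogger | scripts/generate_changelog.py | update_version_links
-- ===== SOURCE A (Python) =====
-- def update_version_links(content: str, version: str) -> str:
--     """Update version comparison links at the bottom of changelog.
--
--     Args:
--         content: Current changelog content
--         version: New version string
--
--     Returns:
--         Updated changelog content
--     """
--     # Find existing version links section
--     lines = content.split("\n")
--
--     # Look for the [Unreleased] link and update it
--     for i, line in enumerate(lines):
--         if line.startswith("[Unreleased]:"):
--             # Update unreleased link to compare from new version
--             lines[i] = (
--                 f"[Unreleased]: https://github.com/username/mypylogger/compare/v{version}...HEAD"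
--             )
--
--             # Add new version link after unreleased
--             new_version_link = (
--                 f"[{version}]: https://github.com/username/mypylogger/releases/tag/v{version}"
--             )
--             lines.insert(i + 1, new_version_link)
--             break
--
--     return "\n".join(lines)
-- ===== SOURCE B (Python) =====
-- def update_version_links(content: str, version: str) -> str:
--     """String-level surgery: no line splitting; find the matching line start by
--     searching the raw text, then splice substrings."""
--     prefix = "[Unreleased]:"
--     if content.startswith(prefix):
--         start = 0
--     else:
--         k = content.find("\n" + prefix)
--         if k == -1:
--             return content
--         start = k + 1
--     end = content.find("\n", start)
--     if end == -1:
--         end = len(content)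
--     unreleased = f"[Unreleased]: https://github.com/username/mypylogger/compare/v{version}...HEAD"
--     tag = f"[{version}]: https://github.com/username/mypylogger/releases/tag/v{version}"
--     return content[:start] + unreleased + "\n" + tag + content[end:]
-- ===== Notes on version B (the rewrite author's own statement) =====
-- stated objective: alternative
-- what changed: B never splits the text into a list of lines: it locates the matching line directly in the raw string (startswith / find of '\n[Unreleased]:'), finds that line's end with find('\n', start), and splices the two new lines in with substring concatenation, instead of A's split-into-lines, enumerate loop with in-place assignment and list.insert, and join.
import Mathlib
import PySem

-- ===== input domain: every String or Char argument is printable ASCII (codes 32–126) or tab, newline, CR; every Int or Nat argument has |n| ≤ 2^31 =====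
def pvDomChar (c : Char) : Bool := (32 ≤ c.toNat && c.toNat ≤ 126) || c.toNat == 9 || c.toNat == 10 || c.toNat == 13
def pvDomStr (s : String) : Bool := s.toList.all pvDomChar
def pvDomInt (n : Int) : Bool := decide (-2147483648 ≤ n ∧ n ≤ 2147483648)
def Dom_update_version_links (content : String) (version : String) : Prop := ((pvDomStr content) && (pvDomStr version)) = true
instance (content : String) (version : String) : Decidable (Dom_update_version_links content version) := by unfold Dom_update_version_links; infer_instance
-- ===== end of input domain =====

-- B never splits the text into lines: it locates the matching line directly in the raw string and
-- splices substrings; the return values are proved equal on all inputs (both functions are total).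

-- ===== PORT A =====
-- A's 'for i, line in enumerate(lines): … break' loop: on the first matching line it performs
-- lines[i] = unrel; lines.insert(i+1, tag) on the full list and stops; falling through keeps lines.
-- (content.split("\n") is ported as PySem.Str.split?, whose 'none' case needs sep = "" and is
-- unreachable for the literal separator "\n".)
def uvlLoop (unrel tag : String) (lines : List String) : List (Int × String) → List String
  | [] => lines
  | (i, line) :: rest =>
    if PySem.Str.startswith line "[Unreleased]:" then
      PySem.List.insert (lines.set i.toNat unrel) (i + 1) tag
    else uvlLoop unrel tag lines rest

def update_version_links (content : String) (version : String) : String :=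
  PySem.Str.join "\n"
    (uvlLoop
      ("[Unreleased]: https://github.com/username/mypylogger/compare/v" ++ version ++ "...HEAD")
      ("[" ++ version ++ "]: https://github.com/username/mypylogger/releases/tag/v" ++ version)
      ((PySem.Str.split? content "\n").getD [])
      (PySem.List.enumerate ((PySem.Str.split? content "\n").getD []) 0))

-- ===== PORT B =====
-- B (Source B): pure string surgery, no line list. 'start' is the char position of the start of the
-- matching line (0 if content itself starts with the prefix, else one past the first
-- "\n[Unreleased]:" occurrence; the early 'return content' when find gives -1 is the 'none' arm);
-- 'end' is the char position of that line's end (next newline, or len(content)); the result is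
-- content[:start] + unreleased + "\n" + tag + content[end:].
def update_version_links_alt (content : String) (version : String) : String :=
  let start? : Option Int :=
    if PySem.Str.startswith content "[Unreleased]:" then some 0
    else
      let k := PySem.Str.find content ("\n" ++ "[Unreleased]:")
      if k = -1 then none else some (k + 1)
  match start? with
  | none => content
  | some start =>
    let e0 := PySem.Str.findFrom content "\n" start
    let e := if e0 = -1 then PySem.Str.len content else e0
    let unreleased := "[Unreleased]: https://github.com/username/mypylogger/compare/v" ++ version ++ "...HEAD"
    let tag := "[" ++ version ++ "]: https://github.com/username/mypylogger/releases/tag/v" ++ version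
    PySem.Str.slice content none (some start) ++ unreleased ++ "\n" ++ tag ++
      PySem.Str.slice content (some e) none

-- ===== PRECONDITION & SPEC =====
def Spec_update_version_links (content : String) (version : String) (out : String) : Prop := out = update_version_links_alt content version
instance (content : String) (version : String) (out : String) : Decidable (Spec_update_version_links content version out) := by unfold Spec_update_version_links; infer_instance

-- ===== CLAIM =====
def Claim_equal_update_version_links : Prop := ∀ (content : String) (version : String), Dom_update_version_links content version → Spec_update_version_links content version (update_version_links content version)

-- ===== LEMMAS AND PROOFS =====

-- Proof-side model of str.split("\n"): accumulator-style single pass over the characters.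
def msplit : List Char → List Char → List (List Char)
  | cur, [] => [cur.reverse]
  | cur, c :: rest => if c = '\n' then cur.reverse :: msplit [] rest else msplit (c :: cur) rest

-- A's loop, characterised on the line list (after uvlLoop_eq): splice at the first matching line.
def lsplice (P U T : List Char) (L : List (List Char)) : List (List Char) :=
  match L.findIdx? (fun l => PySem.Chars.startswith l P) with
  | none => L
  | some j => L.take j ++ [U, T] ++ L.drop (j + 1)

-- B's splice step at char position 'start', char-level.
def bgo (U T cs : List Char) (start : Int) : List Char :=
  let e0 := PySem.Chars.findFrom cs ['\n'] start
  let e : Int := if e0 = -1 then (cs.length : Int) else e0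
  PySem.Chars.slice cs none (some start) ++ U ++ ['\n'] ++ T ++ PySem.Chars.slice cs (some e) none

-- B, char-level.
def bexpr (P U T cs : List Char) : List Char :=
  if PySem.Chars.startswith cs P then bgo U T cs 0
  else if PySem.Chars.find cs ('\n' :: P) = -1 then cs
  else bgo U T cs (PySem.Chars.find cs ('\n' :: P) + 1)

theorem go_none (P l : List Char) (k : Nat) (hl : '\n' ∉ l) :
    PySem.Chars.find.go ('\n' :: P) l k = -1 := by
  induction l generalizing k with
  | nil => simp [PySem.Chars.find.go]
  | cons c t ih =>
    have hc : c ≠ '\n' := fun h => hl (h ▸ List.mem_cons_self)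
    have ht : '\n' ∉ t := fun h => hl (List.mem_cons_of_mem _ h)
    have hc' : ¬('\n' = c) := fun h => hc h.symm
    simp [PySem.Chars.find.go, List.isPrefixOf, hc', ih (k + 1) ht]


theorem go_skip (P l rest : List Char) (k : Nat) (hl : '\n' ∉ l) :
    PySem.Chars.find.go ('\n' :: P) (l ++ '\n' :: rest) k =
      if P.isPrefixOf rest then ((k + l.length : Nat) : Int)
      else PySem.Chars.find.go ('\n' :: P) rest (k + l.length + 1) := by
  induction l generalizing k with
  | nil =>
    simp only [List.nil_append, List.length_nil]
    rw [show PySem.Chars.find.go ('\n' :: P) ('\n' :: rest) k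
        = if ('\n' :: P).isPrefixOf ('\n' :: rest) then (k : Int)
          else PySem.Chars.find.go ('\n' :: P) rest (k + 1) from by
      simp [PySem.Chars.find.go]]
    simp [List.isPrefixOf]
  | cons c t ih =>
    have hc : c ≠ '\n' := fun h => hl (h ▸ List.mem_cons_self)
    have ht : '\n' ∉ t := fun h => hl (List.mem_cons_of_mem _ h)
    rw [show (c :: t) ++ '\n' :: rest = c :: (t ++ '\n' :: rest) from rfl]
    rw [show PySem.Chars.find.go ('\n' :: P) (c :: (t ++ '\n' :: rest)) k
        = if ('\n' :: P).isPrefixOf (c :: (t ++ '\n' :: rest)) then (k : Int)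
          else PySem.Chars.find.go ('\n' :: P) (t ++ '\n' :: rest) (k + 1) from by
      simp [PySem.Chars.find.go]]
    have hpre : ('\n' :: P).isPrefixOf (c :: (t ++ '\n' :: rest)) = false := by
      simp [List.isPrefixOf]
      intro h
      exact absurd h.symm hc
    rw [hpre]
    simp only [Bool.false_eq_true, if_false, ih (k + 1) ht]
    have h1 : k + 1 + t.length = k + (c :: t).length := by simp [List.length_cons]; omega
    rw [h1]


theorem go_shift (sub cs : List Char) (k : Nat) :
    PySem.Chars.find.go sub cs k =
      if PySem.Chars.find cs sub = -1 then -1 else (k : Int) + PySem.Chars.find cs sub := by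
  induction cs generalizing k with
  | nil =>
    by_cases h : sub.isEmpty <;>
      simp [PySem.Chars.find, PySem.Chars.find.go, h]
  | cons c t ih =>
    by_cases h : sub.isPrefixOf (c :: t)
    · simp [PySem.Chars.find, PySem.Chars.find.go, h]
    · rw [show PySem.Chars.find.go sub (c :: t) k
          = if sub.isPrefixOf (c :: t) then (k : Int)
            else PySem.Chars.find.go sub t (k + 1) from by simp [PySem.Chars.find.go]]
      rw [show PySem.Chars.find (c :: t) sub = PySem.Chars.find.go sub (c :: t) 0 from rfl]
      rw [show PySem.Chars.find.go sub (c :: t) 0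
          = if sub.isPrefixOf (c :: t) then (0 : Int)
            else PySem.Chars.find.go sub t (0 + 1) from by simp [PySem.Chars.find.go]]
      simp only [h, Bool.false_eq_true, if_false, zero_add]
      rw [ih (k + 1), ih 1]
      by_cases hft : PySem.Chars.find t sub = -1
      · simp [hft]
      · simp only [if_neg hft]
        push_cast
        have h0 := PySem.Chars.neg_one_le_find t sub
        rw [if_neg (by omega)]
        ring


theorem prefix_skip (P : List Char) (hP : '\n' ∉ P) : ∀ (l rest : List Char),
    P.isPrefixOf (l ++ '\n' :: rest) = P.isPrefixOf l := by
  intro l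
  induction l generalizing P with
  | nil =>
    intro rest
    cases P with
    | nil => simp
    | cons a P' =>
      have ha : a ≠ '\n' := fun h => hP (h ▸ List.mem_cons_self)
      simp [List.isPrefixOf, ha]
  | cons b l' ih =>
    intro rest
    cases P with
    | nil => simp
    | cons a P' =>
      have hP' : '\n' ∉ P' := fun h => hP (List.mem_cons_of_mem _ h)
      simp [List.isPrefixOf, ih P' hP' rest]


theorem splitgo_eq (fuel : Nat) : ∀ (l cur : List Char) (acc : List (List Char)),
    l.length < fuel →
    PySem.Chars.splitOn.go ['\n'] fuel l cur acc = acc.reverse ++ msplit cur l := by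
  induction fuel with
  | zero => intro l cur acc h; omega
  | succ fuel ih =>
    intro l cur acc h
    cases l with
    | nil => simp [PySem.Chars.splitOn.go, msplit]
    | cons c rest =>
      by_cases hc : c = '\n'
      · subst hc
        rw [show PySem.Chars.splitOn.go ['\n'] (fuel + 1) ('\n' :: rest) cur acc
            = PySem.Chars.splitOn.go ['\n'] fuel (List.drop 1 ('\n' :: rest)) [] (cur.reverse :: acc) from by
          simp [PySem.Chars.splitOn.go, List.isPrefixOf]]
        simp only [List.drop_one, List.tail_cons]
        rw [ih rest [] (cur.reverse :: acc) (by simpa using Nat.lt_of_succ_lt_succ h)]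
        simp [msplit]
      · have hc' : ¬('\n' = c) := fun h => hc h.symm
        rw [show PySem.Chars.splitOn.go ['\n'] (fuel + 1) (c :: rest) cur acc
            = PySem.Chars.splitOn.go ['\n'] fuel rest (c :: cur) acc from by
          simp [PySem.Chars.splitOn.go, List.isPrefixOf, hc']]
        rw [ih rest (c :: cur) acc (by simpa using Nat.lt_of_succ_lt_succ h)]
        simp [msplit, hc]


theorem msplit_ne (cs cur : List Char) : msplit cur cs ≠ [] := by
  induction cs generalizing cur with
  | nil => simp [msplit]
  | cons c rest ih =>
    by_cases hc : c = '\n' <;> simp [msplit, hc, ih]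


theorem msplit_free (cs cur : List Char) (h : '\n' ∉ cur) :
    ∀ l ∈ msplit cur cs, '\n' ∉ l := by
  induction cs generalizing cur with
  | nil =>
    intro l hl
    simp only [msplit, List.mem_singleton] at hl
    subst hl
    simpa using h
  | cons c rest ih =>
    intro l hl
    by_cases hc : c = '\n'
    · subst hc
      rw [show msplit cur ('\n' :: rest) = cur.reverse :: msplit [] rest from by
        simp [msplit]] at hl
      rcases List.mem_cons.mp hl with rfl | hl'
      · simpa using h
      · exact ih [] (by simp) l hl' 
    · simp only [msplit, hc, if_false] at hl
      exact ih (c :: cur) (by simp [h, Ne.symm hc]) l hl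


theorem intercalate_cons_of_ne (s a : List Char) (L : List (List Char)) (h : L ≠ []) :
    List.intercalate s (a :: L) = a ++ s ++ List.intercalate s L := by
  cases L with
  | nil => exact absurd rfl h
  | cons b t => simp [List.intercalate]


theorem msplit_join (cs cur : List Char) :
    List.intercalate ['\n'] (msplit cur cs) = cur.reverse ++ cs := by
  induction cs generalizing cur with
  | nil => simp [msplit, List.intercalate]
  | cons c rest ih =>
    by_cases hc : c = '\n'
    · subst hc
      rw [show msplit cur ('\n' :: rest) = cur.reverse :: msplit [] rest from by
        simp [msplit]]
      rw [intercalate_cons_of_ne _ _ _ (msplit_ne rest []), ih []]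
      simp
    · simp only [msplit, hc, if_false]
      rw [ih (c :: cur)]
      simp


theorem lsplice_ne (P U T : List Char) (L : List (List Char)) (h : L ≠ []) :
    lsplice P U T L ≠ [] := by
  unfold lsplice
  cases hf : L.findIdx? (fun l => PySem.Chars.startswith l P) with
  | none => simpa using h
  | some j => simp


theorem bgo_shift (U T l cs' : List Char) (s : Nat) (hs : s ≤ cs'.length) :
    bgo U T (l ++ '\n' :: cs') ((l.length + 1 + s : Nat) : Int) =
      l ++ '\n' :: bgo U T cs' (s : Int) := by
  unfold bgo
  have hlen : l.length + 1 + s ≤ (l ++ '\n' :: cs').length := by simp; omega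
  rw [PySem.Chars.findFrom_natCast _ _ (l.length + 1 + s) hlen,
      PySem.Chars.findFrom_natCast _ _ s hs]
  have hdrop : List.drop (l.length + 1 + s) (l ++ '\n' :: cs') = List.drop s cs' := by
    rw [show l.length + 1 + s = l.length + (s + 1) from by omega]
    simp [List.drop_append]
  have htake : List.take (l.length + 1 + s) (l ++ '\n' :: cs') = l ++ '\n' :: List.take s cs' := by
    rw [show l.length + 1 + s = l.length + (s + 1) from by omega]
    simp [List.take_append]
  rw [hdrop]
  simp only [PySem.Chars.slice_eq_listSlice]
  by_cases hf1 : PySem.Chars.find (List.drop s cs') ['\n'] = -1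
  · rw [hf1]
    norm_num
    rw [PySem.List.slice_to _ (by positivity), PySem.List.slice_from _ (by positivity)]
    rw [show ((l.length : Int) + 1 + (s : Int)).toNat = l.length + 1 + s from by omega]
    rw [show ((l.length : Int) + ((cs'.length : Int) + 1)).toNat = (l ++ '\n' :: cs').length from by
      simp; omega]
    rw [htake]
    simp
  · have hge := PySem.Chars.neg_one_le_find (List.drop s cs') ['\n']
    have hf0 : 0 ≤ PySem.Chars.find (List.drop s cs') ['\n'] := by omega
    have hne1 : ¬(((l.length + 1 + s : Nat) : Int) + PySem.Chars.find (List.drop s cs') ['\n'] = -1) := by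
      omega
    have hne2 : ¬(((s : Nat) : Int) + PySem.Chars.find (List.drop s cs') ['\n'] = -1) := by
      omega
    rw [if_neg hf1, if_neg hne1, if_neg hf1, if_neg hne2]
    rw [PySem.List.slice_to _ (Int.natCast_nonneg _), PySem.List.slice_to _ (Int.natCast_nonneg _),
        PySem.List.slice_from _ (by omega), PySem.List.slice_from _ (by omega)]
    simp only [Int.toNat_natCast]
    rw [htake]
    have ht1 : (((l.length + 1 + s : Nat) : Int) + PySem.Chars.find (List.drop s cs') ['\n']).toNat
        = l.length + ((((s : Nat) : Int) + PySem.Chars.find (List.drop s cs') ['\n']).toNat + 1) := by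
      omega
    rw [ht1]
    simp [List.drop_append]

theorem lsplice_cons_neg (P U T l : List Char) (L : List (List Char))
    (h : PySem.Chars.startswith l P = false) :
    lsplice P U T (l :: L) = l :: lsplice P U T L := by
  unfold lsplice
  rw [List.findIdx?_cons, h]
  cases hf : L.findIdx? (fun x => PySem.Chars.startswith x P) with
  | none => simp
  | some j => simp

theorem find_lt_length (cs sub : List Char) (hsub : sub ≠ [])
    (h : PySem.Chars.find cs sub ≠ -1) :
    (PySem.Chars.find cs sub).toNat < cs.length := by
  have hge := PySem.Chars.neg_one_le_find cs sub
  have h0 : 0 ≤ PySem.Chars.find cs sub := by omega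
  obtain ⟨hpre, -⟩ := PySem.Chars.find_spec h0
  have hne : List.drop (PySem.Chars.find cs sub).toNat cs ≠ [] := by
    intro hnil
    rw [hnil] at hpre
    exact hsub (List.prefix_nil.mp hpre)
  by_contra hc
  exact hne (List.drop_eq_nil_of_le (by omega))

theorem bexpr_step (P U T l cs' : List Char) (hP : '\n' ∉ P) (hl : '\n' ∉ l)
    (hpl : PySem.Chars.startswith l P = false) :
    bexpr P U T (l ++ '\n' :: cs') = l ++ '\n' :: bexpr P U T cs' := by
  have hfull : PySem.Chars.startswith (l ++ '\n' :: cs') P = false := by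
    simpa [PySem.Chars.startswith, prefix_skip P hP l cs'] using hpl
  have hfind : PySem.Chars.find (l ++ '\n' :: cs') ('\n' :: P)
      = if P.isPrefixOf cs' then ((l.length : Nat) : Int)
        else if PySem.Chars.find cs' ('\n' :: P) = -1 then -1
        else ((l.length + 1 : Nat) : Int) + PySem.Chars.find cs' ('\n' :: P) := by
    rw [show PySem.Chars.find (l ++ '\n' :: cs') ('\n' :: P)
        = PySem.Chars.find.go ('\n' :: P) (l ++ '\n' :: cs') 0 from rfl]
    rw [go_skip P l cs' 0 hl, go_shift]
    simp
  unfold bexpr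
  rw [hfull]
  simp only [Bool.false_eq_true, if_false]
  by_cases hpc : P.isPrefixOf cs'
  · have hsw : PySem.Chars.startswith cs' P = true := by
      simpa [PySem.Chars.startswith] using hpc
    rw [hfind, if_pos hpc, hsw]
    rw [if_neg (show ¬(((l.length : Nat) : Int) = -1) from by omega), if_pos rfl]
    rw [show ((l.length : Nat) : Int) + 1 = ((l.length + 1 + 0 : Nat) : Int) from by push_cast; ring]
    rw [bgo_shift U T l cs' 0 (Nat.zero_le _)]
    norm_num
  · have hsw : PySem.Chars.startswith cs' P = false := by
      simp only [PySem.Chars.startswith]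
      exact Bool.eq_false_iff.mpr hpc
    rw [hfind, if_neg hpc, hsw]
    simp only [Bool.false_eq_true, if_false]
    by_cases hf : PySem.Chars.find cs' ('\n' :: P) = -1
    · rw [if_pos hf, if_pos rfl, hf]
      simp
    · have hge := PySem.Chars.neg_one_le_find cs' ('\n' :: P)
      have h0 : 0 ≤ PySem.Chars.find cs' ('\n' :: P) := by omega
      have hlt := find_lt_length cs' ('\n' :: P) (by simp) hf
      rw [if_neg hf]
      rw [if_neg (by push_cast; omega)]
      rw [if_neg hf]
      rw [show ((l.length + 1 : Nat) : Int) + PySem.Chars.find cs' ('\n' :: P) + 1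
          = ((l.length + 1 + ((PySem.Chars.find cs' ('\n' :: P)).toNat + 1) : Nat) : Int) from by
        push_cast; omega]
      rw [bgo_shift U T l cs' ((PySem.Chars.find cs' ('\n' :: P)).toNat + 1) (by omega)]
      rw [show (PySem.Chars.find cs' ('\n' :: P)) + 1
          = (((PySem.Chars.find cs' ('\n' :: P)).toNat + 1 : Nat) : Int) from by push_cast; omega]

theorem main_lines (P U T : List Char) (hP : '\n' ∉ P) :
    ∀ L : List (List Char), L ≠ [] → (∀ l ∈ L, '\n' ∉ l) →
      bexpr P U T (List.intercalate ['\n'] L) = List.intercalate ['\n'] (lsplice P U T L) := by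
  intro L
  induction L with
  | nil => intro h; exact absurd rfl h
  | cons l L' ih =>
    intro _ hfree
    have hl : '\n' ∉ l := hfree l List.mem_cons_self
    have hfree' : ∀ x ∈ L', '\n' ∉ x := fun x hx => hfree x (List.mem_cons_of_mem _ hx)
    cases L' with
    | nil =>
      rw [show List.intercalate ['\n'] [l] = l from by simp [List.intercalate]]
      unfold bexpr
      by_cases hpl : PySem.Chars.startswith l P = true
      · rw [if_pos hpl]
        simp only [bgo]
        rw [PySem.Chars.findFrom_zero]
        rw [show PySem.Chars.find l ['\n'] = PySem.Chars.find.go ('\n' :: []) l 0 from rfl]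
        rw [go_none [] l 0 hl]
        norm_num
        rw [PySem.List.slice_to _ (le_refl 0)]
        unfold lsplice
        rw [List.findIdx?_cons, hpl]
        simp [List.intercalate]
      · have hpl' : PySem.Chars.startswith l P = false := by
          simpa using hpl
        rw [hpl']
        rw [show PySem.Chars.find l ('\n' :: P) = PySem.Chars.find.go ('\n' :: P) l 0 from rfl]
        rw [go_none P l 0 hl]
        norm_num
        unfold lsplice
        rw [List.findIdx?_cons, hpl']
        simp [List.intercalate]
    | cons m M =>
      have hcs : List.intercalate ['\n'] (l :: m :: M)
          = l ++ '\n' :: List.intercalate ['\n'] (m :: M) := by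
        simp [List.intercalate]
      rw [hcs]
      by_cases hpl : PySem.Chars.startswith l P = true
      · have hswfull : PySem.Chars.startswith (l ++ '\n' :: List.intercalate ['\n'] (m :: M)) P = true := by
          simpa [PySem.Chars.startswith, prefix_skip P hP] using hpl
        unfold bexpr
        rw [hswfull]
        simp only [if_true]
        simp only [bgo]
        rw [PySem.Chars.findFrom_zero]
        rw [show PySem.Chars.find (l ++ '\n' :: List.intercalate ['\n'] (m :: M)) ['\n']
            = PySem.Chars.find.go ('\n' :: []) (l ++ '\n' :: List.intercalate ['\n'] (m :: M)) 0 from rfl]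
        rw [go_skip [] l _ 0 hl]
        rw [if_pos (show List.isPrefixOf [] (List.intercalate ['\n'] (m :: M)) = true from by simp)]
        rw [if_neg (show ¬(((0 + l.length : Nat) : Int) = -1) from by omega)]
        rw [PySem.Chars.slice_eq_listSlice, PySem.Chars.slice_eq_listSlice]
        rw [PySem.List.slice_to _ (le_refl 0), PySem.List.slice_from _ (Int.natCast_nonneg _)]
        simp only [Int.toNat_natCast, Nat.zero_add]
        rw [show List.drop l.length (l ++ '\n' :: List.intercalate ['\n'] (m :: M))
            = '\n' :: List.intercalate ['\n'] (m :: M) from by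
          rw [show l.length = l.length + 0 from by omega, List.drop_append]
          simp]
        unfold lsplice
        rw [List.findIdx?_cons, hpl]
        simp [List.intercalate]
      · have hpl' : PySem.Chars.startswith l P = false := by simpa using hpl
        rw [bexpr_step P U T l _ hP hl hpl']
        rw [lsplice_cons_neg P U T l _ hpl']
        rw [intercalate_cons_of_ne _ _ _ (lsplice_ne P U T _ (by simp))]
        rw [ih (by simp) hfree']
        simp

-- A's loop over 'enumerate cur pre.length' inside the full list 'pre ++ cur' computes exactly
-- the first-match splice of 'cur', shifted past the already-scanned prefix 'pre'.
theorem uvlLoop_eq (unrel tag : String) :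
    ∀ (cur pre : List String),
      uvlLoop unrel tag (pre ++ cur) (PySem.List.enumerate cur (pre.length : Int)) =
        match cur.findIdx? (fun line => PySem.Str.startswith line "[Unreleased]:") with
        | none => pre ++ cur
        | some j => pre ++ (cur.take j ++ [unrel, tag] ++ cur.drop (j + 1)) := by
  intro cur
  induction cur with
  | nil => intro pre; simp [PySem.List.enumerate_nil, uvlLoop]
  | cons x rest ih =>
    intro pre
    rw [PySem.List.enumerate_cons]
    by_cases hx : PySem.Str.startswith x "[Unreleased]:" = true
    · simp only [uvlLoop, hx, if_true]
      have hset : (pre ++ x :: rest).set ((pre.length : Int)).toNat unrel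
          = pre ++ unrel :: rest := by simp
      rw [hset]
      have hlen : (pre.length : Int) + 1 = ((pre.length + 1 : Nat) : Int) := by push_cast; ring
      rw [hlen, PySem.List.insert_natCast _ _ _ (by simp)]
      have ht : (pre ++ unrel :: rest).take (pre.length + 1) = pre ++ [unrel] := by
        simp [List.take_append]
      have hd : (pre ++ unrel :: rest).drop (pre.length + 1) = rest := by
        simp [List.drop_append]
      rw [ht, hd]
      have hfi : (x :: rest).findIdx? (fun line => PySem.Str.startswith line "[Unreleased]:")
          = some 0 := by rw [List.findIdx?_cons]; simp only [hx, if_true]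
      rw [hfi]
      simp
    · simp only [Bool.not_eq_true] at hx
      simp only [uvlLoop, hx, Bool.false_eq_true, if_false]
      have hre : pre ++ x :: rest = (pre ++ [x]) ++ rest := by simp
      have hlen : (pre.length : Int) + 1 = ((pre ++ [x]).length : Int) := by simp
      rw [hre, hlen, ih (pre ++ [x])]
      have hcons : (x :: rest).findIdx? (fun line => PySem.Str.startswith line "[Unreleased]:")
          = ((rest).findIdx? (fun line => PySem.Str.startswith line "[Unreleased]:")).map (· + 1) := by
        rw [List.findIdx?_cons]; simp only [hx, Bool.false_eq_true, if_false]
      rw [hcons]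
      cases rest.findIdx? (fun line => PySem.Str.startswith line "[Unreleased]:") with
      | none => simp
      | some j => simp [List.take_succ_cons, List.drop_succ_cons]

theorem a_char (content version : String) :
    (update_version_links content version).toList =
      List.intercalate ['\n']
        (lsplice "[Unreleased]:".toList
          ("[Unreleased]: https://github.com/username/mypylogger/compare/v" ++ version ++ "...HEAD").toList
          ("[" ++ version ++ "]: https://github.com/username/mypylogger/releases/tag/v" ++ version).toList
          (msplit [] content.toList)) := by
  have hnl : ("\n" : String).toList = ['\n'] := rfl
  have hsplit : (PySem.Str.split? content "\n").getD []
      = (msplit [] content.toList).map String.ofList := by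
    rw [show PySem.Str.split? content "\n"
        = some ((PySem.Chars.splitOn content.toList ['\n']).map String.ofList) from by
      simp [PySem.Str.split?, PySem.Chars.split?, hnl]]
    rw [show PySem.Chars.splitOn content.toList ['\n'] = msplit [] content.toList from by
      have h := splitgo_eq (content.toList.length + 1) content.toList [] [] (by omega)
      simpa [PySem.Chars.splitOn] using h]
    rfl
  unfold update_version_links
  rw [hsplit]
  have h := uvlLoop_eq
      ("[Unreleased]: https://github.com/username/mypylogger/compare/v" ++ version ++ "...HEAD")
      ("[" ++ version ++ "]: https://github.com/username/mypylogger/releases/tag/v" ++ version)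
      ((msplit [] content.toList).map String.ofList) []
  simp only [List.nil_append, List.length_nil, Nat.cast_zero] at h
  rw [h]
  rw [List.findIdx?_map]
  have hpred : ((fun line => PySem.Str.startswith line "[Unreleased]:") ∘ String.ofList)
      = fun l => PySem.Chars.startswith l "[Unreleased]:".toList := by
    funext l
    simp [PySem.Str.startswith_eq]
  rw [hpred]
  have hco : (String.toList ∘ String.ofList) = (id : List Char → List Char) := by
    funext l
    simp
  unfold lsplice
  cases hf : (msplit [] content.toList).findIdx?
      (fun l => PySem.Chars.startswith l "[Unreleased]:".toList) with
  | none =>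
    simp only []
    rw [PySem.Str.join]
    simp [PySem.Chars.join, hnl, List.map_map, hco]
  | some j =>
    simp only []
    rw [PySem.Str.join]
    simp [PySem.Chars.join, hnl, List.map_take, List.map_drop, List.map_map, hco,
      String.toList_append]

theorem b_char (content version : String) :
    (update_version_links_alt content version).toList =
      bexpr "[Unreleased]:".toList
        ("[Unreleased]: https://github.com/username/mypylogger/compare/v" ++ version ++ "...HEAD").toList
        ("[" ++ version ++ "]: https://github.com/username/mypylogger/releases/tag/v" ++ version).toList
        content.toList := by
  have hnl : ("\n" : String).toList = ['\n'] := rfl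
  have hpre : ("\n" ++ "[Unreleased]:").toList = '\n' :: "[Unreleased]:".toList := by
    rw [String.toList_append, hnl]
    rfl
  unfold update_version_links_alt bexpr bgo
  simp only [PySem.Str.startswith_eq, PySem.Str.find_eq, PySem.Str.findFrom_eq, PySem.Str.len_eq,
    hpre, hnl]
  by_cases h1 : PySem.Chars.startswith content.toList "[Unreleased]:".toList = true
  · rw [h1]
    simp only [if_true]
    simp [String.toList_append, PySem.Str.toList_slice]
  · have h1' : PySem.Chars.startswith content.toList "[Unreleased]:".toList = false := by
      simpa using h1
    rw [h1']
    simp only [Bool.false_eq_true, if_false]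
    by_cases h2 : PySem.Chars.find content.toList ('\n' :: "[Unreleased]:".toList) = -1
    · rw [h2]
      simp
    · rw [if_neg h2]
      simp only []
      rw [if_neg h2]
      simp [String.toList_append, PySem.Str.toList_slice]

-- ===== VERDICT =====
theorem update_version_links_spec : Claim_equal_update_version_links := by
  intro content version _
  show _ = _
  apply String.toList_inj.mp
  rw [a_char, b_char]
  have hfree : ∀ l ∈ msplit [] content.toList, '\n' ∉ l :=
    msplit_free content.toList [] (by simp)
  have hjoin := msplit_join content.toList []
  simp only [List.reverse_nil, List.nil_append] at hjoin
  have h := main_lines "[Unreleased]:".toList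
    ("[Unreleased]: https://github.com/username/mypylogger/compare/v" ++ version ++ "...HEAD").toList
    ("[" ++ version ++ "]: https://github.com/username/mypylogger/releases/tag/v" ++ version).toList
    (by decide) (msplit [] content.toList) (msplit_ne _ _) hfree
  rw [hjoin] at h
  exact h.symm
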